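-- pv_equiv track=rewrite | github.com/nicolasfoster82/WNS-instancia-evaluativa | src/parsers/carnes_pescados.py | summarize_products
-- ===== SOURCE A (Python) =====
-- def summarize_products(productos: list[dict[str, object]]) -> dict[str, dict[str, int]]:
--     summary: dict[str, dict[str, int]] = {}
--     for producto in productos:
--         categoria = str(producto["categoria"])
--         subcategoria = str(producto["subcategoria"])
--         summary.setdefault(categoria, {})
--         summary[categoria][subcategoria] = summary[categoria].get(subcategoria, 0) + 1
--     return summary
-- ===== SOURCE B (Python) =====
-- def summarize_products(productos: list[dict[str, object]]) -> dict[str, dict[str, int]]: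
--     # Phase 1: flat tally keyed by (categoria, subcategoria), in first-appearance order.
--     tally: dict[tuple[str, str], int] = {}
--     for producto in productos:
--         key = (str(producto["categoria"]), str(producto["subcategoria"]))
--         tally[key] = tally.get(key, 0) + 1
--     # Phase 2: pivot the flat tally into the nested summary.
--     summary: dict[str, dict[str, int]] = {}
--     for (categoria, subcategoria), n in tally.items():
--         summary.setdefault(categoria, {})[subcategoria] = n
--     return summary
-- ===== Notes on version B (the rewrite author's own statement) =====
-- stated objective: alternative
-- what changed: Replaces A's fused loop that updates the nested dict per product with a two-phase count-then-reshape: one pass builds a flat tally keyed by the (categoria, subcategoria) tuple, a second pass pivots the finished tally into the nested summary.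
import Mathlib
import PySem

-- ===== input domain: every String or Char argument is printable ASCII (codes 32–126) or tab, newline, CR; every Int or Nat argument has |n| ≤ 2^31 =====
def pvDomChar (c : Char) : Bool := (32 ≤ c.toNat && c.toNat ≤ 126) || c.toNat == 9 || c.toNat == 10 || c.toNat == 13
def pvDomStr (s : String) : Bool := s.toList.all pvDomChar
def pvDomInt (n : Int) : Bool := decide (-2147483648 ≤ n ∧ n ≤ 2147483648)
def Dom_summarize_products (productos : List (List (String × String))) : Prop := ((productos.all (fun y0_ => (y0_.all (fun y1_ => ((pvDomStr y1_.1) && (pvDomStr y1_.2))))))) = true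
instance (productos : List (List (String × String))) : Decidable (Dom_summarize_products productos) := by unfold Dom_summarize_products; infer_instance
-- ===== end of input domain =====

-- B replaces A's fused per-product update of the nested dict with a two-phase count-then-reshape
-- (flat tally keyed by the (categoria, subcategoria) pair, then a pivot pass); same cost, alternative structure.

-- shared helper: producto[k] lookup on a dict given as an association list; the KeyError case
-- (key absent) is excluded by Pre_, so the "" default is never observed inside the claim.
def pyKey (p : List (String × String)) (k : String) : String :=
  (PySem.Dict.mk p).getD k ""

-- ===== PORT A =====
def summarize_products (productos : List (List (String × String))) : List (String × List (String × Int)) :=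
  let summary : PySem.Dict String (PySem.Dict String Int) :=
    productos.foldl (fun summary producto =>
      let categoria := pyKey producto "categoria"
      let subcategoria := pyKey producto "subcategoria"
      let summary := summary.setdefault categoria PySem.Dict.empty
      summary.insert categoria
        ((summary.getD categoria PySem.Dict.empty).insert subcategoria
          ((summary.getD categoria PySem.Dict.empty).getD subcategoria 0 + 1)))
      PySem.Dict.empty
  summary.items.map (fun q => (q.1, q.2.items))

-- ===== PORT B =====
def summarize_products_alt (productos : List (List (String × String))) : List (String × List (String × Int)) :=
  let tally : PySem.Dict (String × String) Int :=
    productos.foldl (fun t producto =>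
      let key := (pyKey producto "categoria", pyKey producto "subcategoria")
      t.insert key (t.getD key 0 + 1))
      PySem.Dict.empty
  let summary : PySem.Dict String (PySem.Dict String Int) :=
    tally.items.foldl (fun sm q =>
      let sm1 := sm.setdefault q.1.1 PySem.Dict.empty
      sm1.insert q.1.1 ((sm1.getD q.1.1 PySem.Dict.empty).insert q.1.2 q.2))
      PySem.Dict.empty
  summary.items.map (fun q => (q.1, q.2.items))

-- ===== PRECONDITION & SPEC =====
-- Pre_ excludes exactly the inputs where Python A raises KeyError: some producto lacking
-- the key "categoria" or "subcategoria".
def Pre_summarize_products (productos : List (List (String × String))) : Prop :=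
  (productos.all (fun p => (PySem.Dict.mk p).contains "categoria" && (PySem.Dict.mk p).contains "subcategoria")) = true
instance (productos : List (List (String × String))) : Decidable (Pre_summarize_products productos) := by unfold Pre_summarize_products; infer_instance
def pvWitness_summarize_products : (List (List (String × String))) :=
  [[("categoria", "Carnes"), ("subcategoria", "Vacuno")], [("categoria", "Carnes"), ("subcategoria", "Vacuno"), ("stock", "3")]]

def Spec_summarize_products (productos : List (List (String × String))) (out : List (String × List (String × Int))) : Prop := out = summarize_products_alt productos
instance (productos : List (List (String × String))) (out : List (String × List (String × Int))) : Decidable (Spec_summarize_products productos out) := by unfold Spec_summarize_products; infer_instance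

-- ===== CLAIM (what is proved, stated in full; the proofs are below) =====
def Claim_equal_summarize_products : Prop := ∀ (productos : List (List (String × String))), Dom_summarize_products productos → Pre_summarize_products productos → Spec_summarize_products productos (summarize_products productos)

-- ===== LEMMAS AND PROOFS =====

-- generic Dict facts ------------------------------------------------------

theorem map_no_key {κ ν : Type} [BEq κ] (d : PySem.Dict κ ν) (k : κ) (x : κ × ν)
    (h : d.contains k = false) :
    d.items.map (fun p => if (p.1 == k) = true then x else p) = d.items := by
  have h' : ∀ p ∈ d.items, ¬ (p.1 == k) = true := by
    simpa [PySem.Dict.contains, List.any_eq_false] using h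
  calc d.items.map (fun p => if (p.1 == k) = true then x else p)
      = d.items.map id := List.map_congr_left (by intro p hp; simp [h' p hp])
    _ = d.items := List.map_id _

theorem insert_insert_self {κ ν : Type} [BEq κ] [LawfulBEq κ] (d : PySem.Dict κ ν) (k : κ) (v w : ν) :
    (d.insert k v).insert k w = d.insert k w := by
  apply PySem.Dict.ext
  cases hc : d.contains k with
  | false =>
    simp [PySem.Dict.items_insert, hc, map_no_key d k _ hc]
  | true =>
    simp only [PySem.Dict.items_insert, PySem.Dict.contains_insert, hc, BEq.rfl, Bool.true_or,
      ite_true, List.map_map]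
    apply List.map_congr_left
    intro p _
    by_cases hp : (p.1 == k) = true <;> simp [hp, Function.comp]

theorem insert_comm_of_contains {κ ν : Type} [BEq κ] [LawfulBEq κ] (d : PySem.Dict κ ν)
    (k₁ k₂ : κ) (v₁ v₂ : ν) (hc : d.contains k₁ = true) (hne : k₁ ≠ k₂) :
    (d.insert k₁ v₁).insert k₂ v₂ = (d.insert k₂ v₂).insert k₁ v₁ := by
  apply PySem.Dict.ext
  have h21 : (k₂ == k₁) = false := by simp [Ne.symm hne]
  have h12 : (k₁ == k₂) = false := by simp [hne]
  cases hc2 : d.contains k₂ with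
  | false =>
    simp only [PySem.Dict.items_insert, PySem.Dict.contains_insert, hc, hc2, h21, h12,
      Bool.or_true, Bool.or_false, ite_true]
    simp [h21]
  | true =>
    simp only [PySem.Dict.items_insert, PySem.Dict.contains_insert, hc, hc2, h21, h12,
      Bool.or_true, ite_true, List.map_map]
    apply List.map_congr_left
    intro p _
    by_cases hp1 : (p.1 == k₁) = true
    · have : (p.1 == k₂) = false := by
        have := eq_of_beq hp1; subst this; exact h12
      simp [hp1, this, Function.comp, h12]
    · by_cases hp2 : (p.1 == k₂) = true <;> simp [hp1, hp2, Function.comp, h21]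

-- setdefault at c followed by a write at c is just a write at c
theorem setdefault_insert {κ : Type} [BEq κ] [LawfulBEq κ] {ν : Type}
    (d : PySem.Dict κ (PySem.Dict κ ν)) (c : κ) (g : PySem.Dict κ ν → PySem.Dict κ ν) :
    ((d.setdefault c PySem.Dict.empty).insert c (g ((d.setdefault c PySem.Dict.empty).getD c PySem.Dict.empty)))
      = d.insert c (g (d.getD c PySem.Dict.empty)) := by
  cases hc : d.contains c with
  | true => simp [PySem.Dict.setdefault, hc]
  | false =>
    have hfind : d.items.find? (fun p => p.1 == c) = none := by
      rw [List.find?_eq_none]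
      simpa [PySem.Dict.contains, List.any_eq_false] using hc
    have hget : ∀ X, ((PySem.Dict.mk (d.items ++ [(c, X)])).getD c PySem.Dict.empty) = X := by
      intro X
      simp [PySem.Dict.getD, PySem.Dict.get?, List.find?_append, hfind]
    have hcont : (PySem.Dict.mk (d.items ++ [(c, PySem.Dict.empty)])).contains c = true := by
      simp [PySem.Dict.contains]
    apply PySem.Dict.ext
    simp only [PySem.Dict.setdefault, hc, Bool.false_eq_true, if_false, hget,
      PySem.Dict.items_insert, hcont, ite_true, PySem.Dict.getD_of_not_contains _ _ hc]
    show List.map _ (d.items ++ [(c, PySem.Dict.empty)]) = d.items ++ _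
    rw [List.map_append, map_no_key d c _ hc]
    simp

-- the loop bodies of the two ports, named -----------------------------------

def keyf (p : List (String × String)) : String × String :=
  (pyKey p "categoria", pyKey p "subcategoria")

def stepA (d : PySem.Dict String (PySem.Dict String Int)) (k : String × String) :
    PySem.Dict String (PySem.Dict String Int) :=
  let d1 := d.setdefault k.1 PySem.Dict.empty
  d1.insert k.1 ((d1.getD k.1 PySem.Dict.empty).insert k.2
    ((d1.getD k.1 PySem.Dict.empty).getD k.2 0 + 1))

def bumpT (t : PySem.Dict (String × String) Int) (k : String × String) : PySem.Dict (String × String) Int :=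
  t.insert k (t.getD k 0 + 1)

def stepB (sm : PySem.Dict String (PySem.Dict String Int)) (q : (String × String) × Int) :
    PySem.Dict String (PySem.Dict String Int) :=
  let sm1 := sm.setdefault q.1.1 PySem.Dict.empty
  sm1.insert q.1.1 ((sm1.getD q.1.1 PySem.Dict.empty).insert q.1.2 q.2)

-- setdefault-free normal form of stepA
def stepA1 (d : PySem.Dict String (PySem.Dict String Int)) (c s : String) :
    PySem.Dict String (PySem.Dict String Int) :=
  d.insert c ((d.getD c PySem.Dict.empty).insert s ((d.getD c PySem.Dict.empty).getD s 0 + 1))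

theorem stepA_eq (d : PySem.Dict String (PySem.Dict String Int)) (k : String × String) :
    stepA d k = stepA1 d k.1 k.2 := by
  show ((d.setdefault k.1 PySem.Dict.empty).insert k.1
      ((fun X => X.insert k.2 (X.getD k.2 0 + 1)) ((d.setdefault k.1 PySem.Dict.empty).getD k.1 PySem.Dict.empty)))
      = _
  rw [setdefault_insert d k.1 (fun X => X.insert k.2 (X.getD k.2 0 + 1))]
  rfl

theorem stepB_eq (sm : PySem.Dict String (PySem.Dict String Int)) (q : (String × String) × Int) :
    stepB sm q = sm.insert q.1.1 ((sm.getD q.1.1 PySem.Dict.empty).insert q.1.2 q.2) := by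
  show ((sm.setdefault q.1.1 PySem.Dict.empty).insert q.1.1
      ((fun X => X.insert q.1.2 q.2) ((sm.setdefault q.1.1 PySem.Dict.empty).getD q.1.1 PySem.Dict.empty))) = _
  rw [setdefault_insert sm q.1.1 (fun X => X.insert q.1.2 q.2)]

-- one stepB with the bumped count = stepB with the old count followed by one A-step
theorem stepB_bump (sm : PySem.Dict String (PySem.Dict String Int)) (c s : String) (v : Int) :
    stepB sm ((c, s), v + 1) = stepA1 (stepB sm ((c, s), v)) c s := by
  rw [stepB_eq, stepB_eq]
  unfold stepA1
  rw [PySem.Dict.getD_insert_self, insert_insert_self, PySem.Dict.getD_insert_self,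
    insert_insert_self]

theorem contains_stepB (sm : PySem.Dict String (PySem.Dict String Int)) (c s : String)
    (q : (String × String) × Int) :
    (((stepB sm q).getD c PySem.Dict.empty).contains s)
      = (((q.1 = (c, s)) : Bool) || (sm.getD c PySem.Dict.empty).contains s) := by
  obtain ⟨⟨c', s'⟩, v⟩ := q
  rw [stepB_eq]
  by_cases hcc : c = c'
  · subst hcc
    rw [PySem.Dict.getD_insert_self, PySem.Dict.contains_insert]
    by_cases hss : s = s'
    · subst hss; simp
    · simp [hss, Ne.symm hss]
  · rw [PySem.Dict.getD_insert_of_ne _ _ _ hcc]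
    simp
    intro h _
    exact absurd h.symm hcc

theorem contains_of_inner_contains (sm : PySem.Dict String (PySem.Dict String Int)) (c s : String)
    (hs : ((sm.getD c PySem.Dict.empty).contains s) = true) : sm.contains c = true := by
  cases h : sm.contains c with
  | true => rfl
  | false =>
    rw [PySem.Dict.getD_of_not_contains _ _ h] at hs
    simp [PySem.Dict.contains, PySem.Dict.empty] at hs

-- stepA1 at (c, s) commutes past a stepB whose key differs, provided s is already present
theorem stepB_stepA1_swap (sm : PySem.Dict String (PySem.Dict String Int)) (c s : String)
    (q : (String × String) × Int) (hq : q.1 ≠ (c, s))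
    (hs : ((sm.getD c PySem.Dict.empty).contains s) = true) :
    stepB (stepA1 sm c s) q = stepA1 (stepB sm q) c s := by
  obtain ⟨⟨c', s'⟩, v⟩ := q
  have hc : sm.contains c = true := contains_of_inner_contains sm c s hs
  rw [stepB_eq, stepB_eq]
  by_cases hcc : c' = c
  · subst hcc
    have hss : s' ≠ s := by intro h; exact hq (by rw [h])
    show (stepA1 sm c' s).insert c' (((stepA1 sm c' s).getD c' PySem.Dict.empty).insert s' v) = _
    unfold stepA1
    rw [PySem.Dict.getD_insert_self, insert_insert_self, PySem.Dict.getD_insert_self,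
      insert_insert_self, PySem.Dict.getD_insert_of_ne _ _ _ (Ne.symm hss),
      insert_comm_of_contains _ s s' _ _ hs hss.symm]
  · show (stepA1 sm c s).insert c' (((stepA1 sm c s).getD c' PySem.Dict.empty).insert s' v) = _
    unfold stepA1
    rw [PySem.Dict.getD_insert_of_ne _ _ _ hcc, PySem.Dict.getD_insert_of_ne _ _ _ (Ne.symm hcc),
      insert_comm_of_contains _ c c' _ _ hc (Ne.symm hcc)]

theorem pivot_comm (rest : List ((String × String) × Int)) (sm : PySem.Dict String (PySem.Dict String Int))
    (c s : String) (hrest : ∀ q ∈ rest, q.1 ≠ (c, s))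
    (hs : ((sm.getD c PySem.Dict.empty).contains s) = true) :
    rest.foldl stepB (stepA1 sm c s) = stepA1 (rest.foldl stepB sm) c s := by
  induction rest generalizing sm with
  | nil => rfl
  | cons q rest ih =>
    rw [List.foldl_cons, List.foldl_cons,
      stepB_stepA1_swap sm c s q (hrest q (List.mem_cons_self)) hs]
    exact ih (stepB sm q) (fun r hr => hrest r (List.mem_cons_of_mem _ hr))
      (by rw [contains_stepB, hs, Bool.or_true])

-- the core: pivoting after one tally bump = pivoting then one A-step
theorem pivot_bump (l : List ((String × String) × Int)) (sm : PySem.Dict String (PySem.Dict String Int))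
    (c s : String) (hnd : (l.map (·.1)).Nodup)
    (hs : ((sm.getD c PySem.Dict.empty).contains s) = false) :
    ((PySem.Dict.mk l).insert (c, s) ((PySem.Dict.mk l).getD (c, s) 0 + 1)).items.foldl stepB sm
      = stepA1 (l.foldl stepB sm) c s := by
  induction l generalizing sm with
  | nil =>
    have h0 : ((PySem.Dict.mk ([] : List ((String × String) × Int))).insert (c, s)
        ((PySem.Dict.mk ([] : List ((String × String) × Int))).getD (c, s) 0 + 1)).items
        = [((c, s), 1)] := by
      simp [PySem.Dict.insert, PySem.Dict.contains, PySem.Dict.getD, PySem.Dict.get?]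
    rw [h0]
    show stepB sm ((c, s), 1) = _
    rw [stepB_eq]
    unfold stepA1
    simp [PySem.Dict.getD_of_not_contains _ _ hs]
  | cons q l ih =>
    obtain ⟨⟨c', s'⟩, v⟩ := q
    by_cases hq : (c', s') = (c, s)
    · obtain ⟨rfl, rfl⟩ := Prod.mk.injEq .. ▸ hq
      have hnotin : ¬ (c', s') ∈ l.map (·.1) := (List.nodup_cons.mp hnd).1
      have hcl : (PySem.Dict.mk l).contains (c', s') = false := by
        simp only [PySem.Dict.contains, List.any_eq_false]
        intro p hp
        simp only [beq_iff_eq]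
        intro h
        exact hnotin (h ▸ List.mem_map_of_mem hp)
      have hcont : (PySem.Dict.mk (((c', s'), v) :: l)).contains (c', s') = true := by
        simp [PySem.Dict.contains]
      have hget : (PySem.Dict.mk (((c', s'), v) :: l)).getD (c', s') 0 = v := by
        simp [PySem.Dict.getD, PySem.Dict.get?]
      have hitems : ((PySem.Dict.mk (((c', s'), v) :: l)).insert (c', s')
          ((PySem.Dict.mk (((c', s'), v) :: l)).getD (c', s') 0 + 1)).items
          = ((c', s'), v + 1) :: l := by
        rw [hget]
        simp only [PySem.Dict.items_insert, hcont, ite_true]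
        show (((c', s'), v) :: l).map _ = _
        rw [List.map_cons]
        have h2 := map_no_key (PySem.Dict.mk l) (c', s') ((c', s'), v + 1) hcl
        rw [h2]
        simp
      rw [hitems, List.foldl_cons, stepB_bump, List.foldl_cons,
        pivot_comm l (stepB sm ((c', s'), v)) c' s'
          (fun r hr => by
            intro h
            exact hnotin (h ▸ List.mem_map_of_mem hr))
          (by rw [contains_stepB]; simp)]
    · have hq' : ((c', s') == (c, s)) = false := by simpa using hq
      have hcont : ∀ w : Int, ((PySem.Dict.mk ((((c', s'), v)) :: l)).insert (c, s) w).items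
          = ((c', s'), v) :: ((PySem.Dict.mk l).insert (c, s) w).items := by
        intro w
        have hc2 : (PySem.Dict.mk ((((c', s'), v)) :: l)).contains (c, s)
            = (PySem.Dict.mk l).contains (c, s) := by
          simp [PySem.Dict.contains, hq']
        cases hcl : (PySem.Dict.mk l).contains (c, s) with
        | true =>
          simp only [PySem.Dict.items_insert, hc2, hcl, ite_true]
          show (((c', s'), v) :: l).map _ = _
          rw [List.map_cons]
          simp [hq']
        | false =>
          simp only [PySem.Dict.items_insert, hc2, hcl, Bool.false_eq_true, if_false]
          rfl
      have hget : (PySem.Dict.mk ((((c', s'), v)) :: l)).getD (c, s) 0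
          = (PySem.Dict.mk l).getD (c, s) 0 := by
        simp [PySem.Dict.getD, PySem.Dict.get?, hq']
      rw [hget, hcont, List.foldl_cons, List.foldl_cons,
        ih (stepB sm ((c', s'), v)) (List.nodup_cons.mp hnd).2
          (by rw [contains_stepB, hs, Bool.or_false]; simpa using hq)]

theorem pivot_counter (ks : List (String × String)) (t : PySem.Dict (String × String) Int)
    (hnd : t.keys.Nodup) :
    (ks.foldl bumpT t).items.foldl stepB PySem.Dict.empty
      = ks.foldl (fun d k => stepA1 d k.1 k.2) (t.items.foldl stepB PySem.Dict.empty) := by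
  induction ks generalizing t with
  | nil => rfl
  | cons k ks ih =>
    rw [List.foldl_cons, List.foldl_cons,
      ih (bumpT t k) (PySem.Dict.nodup_keys_insert t k _ hnd)]
    congr 1
    obtain ⟨c, s⟩ := k
    obtain ⟨l⟩ := t
    exact pivot_bump l PySem.Dict.empty c s
      (by simpa [PySem.Dict.keys] using hnd)
      (by simp [PySem.Dict.getD, PySem.Dict.get?, PySem.Dict.empty, PySem.Dict.contains])

-- the two ports, re-stated over the extracted key list ----------------------

theorem portA_eq (productos : List (List (String × String))) :
    summarize_products productos
      = ((productos.map keyf).foldl stepA PySem.Dict.empty).items.map (fun q => (q.1, q.2.items)) := by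
  show ((productos.foldl (fun d p => stepA d (keyf p)) PySem.Dict.empty).items.map (fun q => (q.1, q.2.items))) = _
  rw [List.foldl_map]

theorem portB_eq (productos : List (List (String × String))) :
    summarize_products_alt productos
      = ((((productos.map keyf).foldl bumpT PySem.Dict.empty).items.foldl stepB PySem.Dict.empty).items.map (fun q => (q.1, q.2.items))) := by
  show ((((productos.foldl (fun t p => bumpT t (keyf p)) PySem.Dict.empty).items.foldl stepB PySem.Dict.empty).items.map (fun q => (q.1, q.2.items)))) = _
  rw [List.foldl_map]

-- ===== VERDICT (by name: the statement is the Claim_ definition above) =====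
theorem summarize_products_spec : Claim_equal_summarize_products := by
  intro productos _ _
  unfold Spec_summarize_products
  rw [portA_eq, portB_eq,
    pivot_counter (productos.map keyf) PySem.Dict.empty PySem.Dict.nodup_keys_empty]
  have hA : stepA = fun d k => stepA1 d k.1 k.2 := funext fun d => funext fun k => stepA_eq d k
  rw [hA]
  rfl
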